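-- pv_equiv track=rewrite | github.com/Mangjun/Algorithm_Math | Chap04/example4_2_3.py | solve
-- ===== SOURCE A (Python) =====
-- def solve(N, Q_List):
--     """
--     접근 방식: 계차를 사용하여 계산
--
--     Step 1. 계차 배열 생성
--     Step 2. 질문마다 계차 배열 업데이트
--     Step 3. 계차가 부호에 따라 문자열 출력 -> 양수일 시 <, 음수일 시 >, 0일 시 =
--
--     Input:
--         N: 지역 수
--         Q_List: 눈 리스트
--     Return: 인접한 지역 간의 눈 양
--     """
--
--     answer = ''
--
--     # Step 1
--     N_List = [ 0 ] * N
--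
--     # Step 2
--     for q in Q_List:
--         N_List[(q[0] - 1)] += q[2]
--         if q[1] < N:
--             N_List[q[1]] -= q[2]
--
--     # Step 3
--     for i in range(1, N):
--         if N_List[i] > 0:
--             answer += '<'
--         elif N_List[i] == 0:
--             answer += '='
--         else:
--             answer += '>'
--
--     return answer
-- ===== SOURCE B (Python) =====
-- def solve(N, Q_List):
--     # Sweep formulation: deposit +c where a query's range opens and -c where it
--     # closes, prefix-sum the events into actual per-region totals, then compare
--     # each neighbouring pair of totals.
--     events = [0] * N
--     for a, _, c in Q_List:
--         events[a - 1] += c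
--     for _, b, c in Q_List:
--         if b < N:
--             events[b] -= c
--     totals = []
--     snow = 0
--     for e in events:
--         snow += e
--         totals.append(snow)
--     return ''.join(
--         '<' if cur > prev else '=' if cur == prev else '>'
--         for prev, cur in zip(totals, totals[1:])
--     )
-- ===== Notes on version B (the rewrite author's own statement) =====
-- stated objective: alternative
-- what changed: B uses a sweep formulation: two event-deposit passes (+c where a range opens, -c where it closes), a prefix-sum pass materialising the actual per-region totals, and a zip over neighbouring totals to emit the comparisons, instead of A's single combined difference-array pass whose entries are read off directly as signs; Pre_ excludes exactly the inputs on which A raises IndexError.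
import Mathlib
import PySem

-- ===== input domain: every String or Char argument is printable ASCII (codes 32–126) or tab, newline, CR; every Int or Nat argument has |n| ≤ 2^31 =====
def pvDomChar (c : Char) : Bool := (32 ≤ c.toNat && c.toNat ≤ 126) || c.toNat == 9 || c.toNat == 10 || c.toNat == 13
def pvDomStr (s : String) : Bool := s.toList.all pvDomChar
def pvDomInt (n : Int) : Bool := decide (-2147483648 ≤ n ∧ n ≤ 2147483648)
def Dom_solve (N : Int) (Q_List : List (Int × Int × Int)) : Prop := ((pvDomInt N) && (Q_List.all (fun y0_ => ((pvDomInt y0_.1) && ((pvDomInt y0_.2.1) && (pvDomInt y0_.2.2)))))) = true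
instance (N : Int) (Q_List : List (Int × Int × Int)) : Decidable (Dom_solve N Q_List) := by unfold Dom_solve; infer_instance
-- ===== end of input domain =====

-- B materialises actual per-region totals (sweep events, prefix sums) and compares neighbouring
-- totals, instead of A's single difference-array pass read off as signs (objective: alternative).


-- ===== PORT A =====
-- one iteration of A's Step-2 loop: N_List[q[0]-1] += q[2]; if q[1] < N: N_List[q[1]] -= q[2]
def solveStep (N : Int) (L : List Int) (q : Int × Int × Int) : List Int :=
  let L1 := PySem.List.pySetD L (q.1 - 1) (PySem.List.pyGetD L (q.1 - 1) 0 + q.2.2)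
  if q.2.1 < N then PySem.List.pySetD L1 q.2.1 (PySem.List.pyGetD L1 q.2.1 0 - q.2.2) else L1

-- N_List after Steps 1 and 2
def solveList (N : Int) (Q_List : List (Int × Int × Int)) : List Int :=
  Q_List.foldl (solveStep N) (List.replicate N.toNat 0)

def solve (N : Int) (Q_List : List (Int × Int × Int)) : String :=
  String.ofList ((PySem.List.pyRange 1 N).foldl (fun ans i =>
    ans ++ [if 0 < PySem.List.pyGetD (solveList N Q_List) i 0 then '<'
            else if PySem.List.pyGetD (solveList N Q_List) i 0 = 0 then '=' else '>']) [])

-- ===== PORT B =====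
-- Source B's first sweep pass: events[a-1] += c
def openStep (L : List Int) (q : Int × Int × Int) : List Int :=
  PySem.List.pySetD L (q.1 - 1) (PySem.List.pyGetD L (q.1 - 1) 0 + q.2.2)

-- Source B's second sweep pass: if b < N: events[b] -= c
def closeStep (N : Int) (L : List Int) (q : Int × Int × Int) : List Int :=
  if q.2.1 < N then PySem.List.pySetD L q.2.1 (PySem.List.pyGetD L q.2.1 0 - q.2.2) else L

-- the events array after both passes
def eventsB (N : Int) (Q_List : List (Int × Int × Int)) : List Int :=
  Q_List.foldl (closeStep N) (Q_List.foldl openStep (List.replicate N.toNat 0))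

-- Source B's accumulation loop: snow += e; totals.append(snow)
def accumB (es : List Int) : List Int :=
  (es.foldl (fun (st : Int × List Int) e => (st.1 + e, st.2 ++ [st.1 + e])) (0, [])).2

-- the totals list Source B accumulates
def totalsB (N : Int) (Q_List : List (Int × Int × Int)) : List Int :=
  accumB (eventsB N Q_List)

def solve_alt (N : Int) (Q_List : List (Int × Int × Int)) : String :=
  String.ofList (((totalsB N Q_List).zip
      (PySem.List.slice (totalsB N Q_List) (some 1) none)).map (fun pc =>
    if pc.1 < pc.2 then '<' else if pc.2 = pc.1 then '=' else '>'))

-- ===== PRECONDITION & SPEC =====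
-- Pre_ excludes exactly the inputs where A raises IndexError: a query whose index a-1
-- (or b when b < N) falls outside Python's valid index range [-N, N) for the length-N list.
def Pre_solve (N : Int) (Q_List : List (Int × Int × Int)) : Prop :=
  ∀ q ∈ Q_List, PySem.Raise.InRange N.toNat (q.1 - 1) ∧
    (q.2.1 < N → PySem.Raise.InRange N.toNat q.2.1)
instance (N : Int) (Q_List : List (Int × Int × Int)) : Decidable (Pre_solve N Q_List) := by unfold Pre_solve; infer_instance

def pvWitness_solve : Int × (List (Int × Int × Int)) := (3, [(1, 2, 5), (2, 3, 1)])

def Spec_solve (N : Int) (Q_List : List (Int × Int × Int)) (out : String) : Prop := out = solve_alt N Q_List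
instance (N : Int) (Q_List : List (Int × Int × Int)) (out : String) : Decidable (Spec_solve N Q_List out) := by unfold Spec_solve; infer_instance

-- ===== CLAIM (what is proved, stated in full; the proofs are below) =====
def Claim_equal_solve : Prop := ∀ (N : Int) (Q_List : List (Int × Int × Int)), Dom_solve N Q_List → Pre_solve N Q_List → Spec_solve N Q_List (solve N Q_List)

-- ===== LEMMAS AND PROOFS =====

-- net contribution of one query to the difference at boundary i (proof-only helper)
def contribQ (N i : Int) (q : Int × Int × Int) : Int :=
  (if PySem.Int.mod (q.1 - 1) N = i then q.2.2 else 0) -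
  (if q.2.1 < N ∧ PySem.Int.mod q.2.1 N = i then q.2.2 else 0)

-- Python's index normalisation, made explicit
lemma pySetD_eq (L : List Int) (j v : Int) (hj : PySem.Raise.InRange L.length j) :
    PySem.List.pySetD L j v =
      L.set (if 0 ≤ j then j.toNat else L.length - (-j).toNat) v := by
  obtain ⟨hj1, hj2⟩ := hj
  simp only [PySem.List.pySetD, PySem.List.pySet?, PySem.List.pyIdx?]
  split_ifs <;> simp_all

lemma pyGetD_eq_idx (L : List Int) (j d : Int) (hj : PySem.Raise.InRange L.length j) :
    PySem.List.pyGetD L j d =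
      L.getD (if 0 ≤ j then j.toNat else L.length - (-j).toNat) d := by
  obtain ⟨hj1, hj2⟩ := hj
  simp only [PySem.List.pyGetD, PySem.List.pyGet?, PySem.List.pyIdx?]
  split_ifs <;> simp_all [List.getD_eq_getElem?_getD]

-- j % len picks exactly the normalised Python index
lemma idx_mod (n : Nat) (j i : Int) (hj1 : -(n : Int) ≤ j) (hj2 : j < n)
    (hi0 : 0 ≤ i) (hi : i < n) :
    (PySem.Int.mod j (n : Int) = i) ↔
      ((if 0 ≤ j then j.toNat else n - (-j).toNat) = i.toNat) := by
  rw [PySem.Int.mod_eq_emod_of_pos (by omega)]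
  by_cases h : 0 ≤ j
  · rw [if_pos h]
    rw [Int.emod_eq_of_lt h hj2]; omega
  · rw [if_neg h]
    have hmod : j % (n : Int) = j + n := by
      have h1 : (j + n * 1) % (n : Int) = j % n := Int.add_mul_emod_self_left j (n:Int) 1
      have h2 : (j + n) % (n : Int) = j + n := Int.emod_eq_of_lt (by omega) (by omega)
      simpa using h1.symm.trans (by simpa using h2)
    rw [hmod]; omega

lemma pyGetD_congr_mod (L : List Int) (j i : Int)
    (hj : PySem.Raise.InRange L.length j) (hi0 : 0 ≤ i) (hi : i < (L.length : Int))
    (h : PySem.Int.mod j (L.length : Int) = i) :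
    PySem.List.pyGetD L j 0 = PySem.List.pyGetD L i 0 := by
  rw [pyGetD_eq_idx L j 0 hj, pyGetD_eq_idx L i 0 ⟨by omega, hi⟩, if_pos hi0,
    (idx_mod L.length j i hj.1 hj.2 hi0 hi).mp h]

lemma pyGetD_pySetD_full (L : List Int) (j i v : Int)
    (hj : PySem.Raise.InRange L.length j) (hi0 : 0 ≤ i) (hi : i < (L.length : Int)) :
    PySem.List.pyGetD (PySem.List.pySetD L j v) i 0 =
      if PySem.Int.mod j (L.length : Int) = i then v else PySem.List.pyGetD L i 0 := by
  rw [pySetD_eq L j v hj]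
  rw [pyGetD_eq_idx _ i 0 ⟨by simp; omega, by simp; omega⟩, if_pos hi0]
  rw [pyGetD_eq_idx L i 0 ⟨by omega, hi⟩, if_pos hi0]
  by_cases h : PySem.Int.mod j (L.length : Int) = i
  · rw [if_pos h]
    rw [idx_mod L.length j i hj.1 hj.2 hi0 hi] at h
    simp [List.getD_eq_getElem?_getD, h, (by omega : i.toNat < L.length)]
  · rw [if_neg h]
    rw [idx_mod L.length j i hj.1 hj.2 hi0 hi] at h
    simp [List.getD_eq_getElem?_getD, h]

-- the two update shapes of the loops: v += c and v -= c at a possibly negative index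
lemma getD_update (L : List Int) (j i c : Int)
    (hj : PySem.Raise.InRange L.length j) (hi0 : 0 ≤ i) (hi : i < (L.length : Int)) :
    PySem.List.pyGetD (PySem.List.pySetD L j (PySem.List.pyGetD L j 0 + c)) i 0 =
      PySem.List.pyGetD L i 0 + if PySem.Int.mod j (L.length : Int) = i then c else 0 := by
  rw [pyGetD_pySetD_full L j i _ hj hi0 hi]
  split_ifs with h
  · rw [pyGetD_congr_mod L j i hj hi0 hi h]
  · ring

lemma getD_update_sub (L : List Int) (j i c : Int)
    (hj : PySem.Raise.InRange L.length j) (hi0 : 0 ≤ i) (hi : i < (L.length : Int)) :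
    PySem.List.pyGetD (PySem.List.pySetD L j (PySem.List.pyGetD L j 0 - c)) i 0 =
      PySem.List.pyGetD L i 0 - if PySem.Int.mod j (L.length : Int) = i then c else 0 := by
  rw [pyGetD_pySetD_full L j i _ hj hi0 hi]
  split_ifs with h
  · rw [pyGetD_congr_mod L j i hj hi0 hi h]
  · ring

-- loop invariant for A's Step-2 fold: reading boundary i accumulates the contributions
lemma foldA_getD (N i : Int) (Q : List (Int × Int × Int)) :
    ∀ (L : List Int), L.length = N.toNat →
    (∀ q ∈ Q, PySem.Raise.InRange N.toNat (q.1 - 1) ∧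
      (q.2.1 < N → PySem.Raise.InRange N.toNat q.2.1)) →
    0 ≤ i → i < N →
    PySem.List.pyGetD (Q.foldl (solveStep N) L) i 0 =
      PySem.List.pyGetD L i 0 + (Q.map (contribQ N i)).sum := by
  induction Q with
  | nil => intro L _ _ _ _; simp
  | cons q Q ih =>
    intro L hlen hpre hi0 hiN
    have hq := hpre q (List.mem_cons_self ..)
    have hlenI : ((L.length : Nat) : Int) = N := by omega
    have hstep : PySem.List.pyGetD (solveStep N L q) i 0 =
        PySem.List.pyGetD L i 0 + contribQ N i q := by
      have hja : PySem.Raise.InRange L.length (q.1 - 1) := by rw [hlen]; exact hq.1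
      unfold solveStep
      by_cases hb : q.2.1 < N
      · have hjb : PySem.Raise.InRange
            (PySem.List.pySetD L (q.1 - 1) (PySem.List.pyGetD L (q.1 - 1) 0 + q.2.2)).length
            q.2.1 := by rw [PySem.List.length_pySetD, hlen]; exact hq.2 hb
        rw [if_pos hb,
          getD_update_sub _ _ _ _ hjb hi0 (by rw [PySem.List.length_pySetD]; omega),
          getD_update _ _ _ _ hja hi0 (by omega)]
        simp only [PySem.List.length_pySetD, hlenI]
        unfold contribQ
        split_ifs <;> simp_all <;> ring
      · rw [if_neg hb, getD_update _ _ _ _ hja hi0 (by omega), hlenI]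
        unfold contribQ
        split_ifs <;> simp_all
    have hlen' : (solveStep N L q).length = N.toNat := by
      unfold solveStep
      split <;> simp [PySem.List.length_pySetD, hlen]
    rw [List.foldl_cons, ih _ hlen' (fun p hp => hpre p (List.mem_cons_of_mem _ hp)) hi0 hiN,
      hstep, List.map_cons, List.sum_cons]
    ring

-- loop invariant for Source B's opening pass
lemma foldOpen_getD (N i : Int) (Q : List (Int × Int × Int)) :
    ∀ (L : List Int), L.length = N.toNat →
    (∀ q ∈ Q, PySem.Raise.InRange N.toNat (q.1 - 1)) → 0 ≤ i → i < N →
    PySem.List.pyGetD (Q.foldl openStep L) i 0 =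
      PySem.List.pyGetD L i 0 +
        (Q.map (fun q => if PySem.Int.mod (q.1 - 1) N = i then q.2.2 else 0)).sum := by
  induction Q with
  | nil => intro L _ _ _ _; simp
  | cons q Q ih =>
    intro L hlen hpre hi0 hiN
    have hlenI : ((L.length : Nat) : Int) = N := by omega
    have hja : PySem.Raise.InRange L.length (q.1 - 1) := by
      rw [hlen]; exact hpre q (List.mem_cons_self ..)
    rw [List.foldl_cons,
      ih _ (by rw [openStep, PySem.List.length_pySetD]; exact hlen)
        (fun p hp => hpre p (List.mem_cons_of_mem _ hp)) hi0 hiN,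
      openStep, getD_update _ _ _ _ hja hi0 (by omega), hlenI,
      List.map_cons, List.sum_cons]
    ring

-- loop invariant for Source B's closing pass
lemma foldClose_getD (N i : Int) (Q : List (Int × Int × Int)) :
    ∀ (L : List Int), L.length = N.toNat →
    (∀ q ∈ Q, q.2.1 < N → PySem.Raise.InRange N.toNat q.2.1) → 0 ≤ i → i < N →
    PySem.List.pyGetD (Q.foldl (closeStep N) L) i 0 =
      PySem.List.pyGetD L i 0 -
        (Q.map (fun q => if q.2.1 < N ∧ PySem.Int.mod q.2.1 N = i then q.2.2 else 0)).sum := by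
  induction Q with
  | nil => intro L _ _ _ _; simp
  | cons q Q ih =>
    intro L hlen hpre hi0 hiN
    have hlenI : ((L.length : Nat) : Int) = N := by omega
    have hstep : PySem.List.pyGetD (closeStep N L q) i 0 =
        PySem.List.pyGetD L i 0 -
          if q.2.1 < N ∧ PySem.Int.mod q.2.1 N = i then q.2.2 else 0 := by
      unfold closeStep
      by_cases hb : q.2.1 < N
      · have hjb : PySem.Raise.InRange L.length q.2.1 := by
          rw [hlen]; exact hpre q (List.mem_cons_self ..) hb
        rw [if_pos hb, getD_update_sub _ _ _ _ hjb hi0 (by omega), hlenI]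
        split_ifs <;> simp_all
      · rw [if_neg hb]
        split_ifs <;> simp_all
    have hlen' : (closeStep N L q).length = N.toNat := by
      unfold closeStep
      split <;> simp [PySem.List.length_pySetD, hlen]
    rw [List.foldl_cons, ih _ hlen' (fun p hp => hpre p (List.mem_cons_of_mem _ hp)) hi0 hiN,
      hstep, List.map_cons, List.sum_cons]
    ring

lemma sum_map_sub {α : Type} (f g : α → Int) (Q : List α) :
    (Q.map (fun q => f q - g q)).sum = (Q.map f).sum - (Q.map g).sum := by
  induction Q with
  | nil => simp
  | cons q Q ih => simp only [List.map_cons, List.sum_cons, ih]; ring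

lemma getD_replicate (n : Nat) (i : Int) (hi0 : 0 ≤ i) (hi : i < (n : Int)) :
    PySem.List.pyGetD (List.replicate n (0 : Int)) i 0 = 0 := by
  rw [PySem.List.pyGetD_eq_getElem _ 0 hi0 (by simpa using hi)]
  simp

-- lengths are preserved by both of Source B's passes
lemma length_foldOpen (Q : List (Int × Int × Int)) (L : List Int) :
    (Q.foldl openStep L).length = L.length := by
  induction Q generalizing L with
  | nil => rfl
  | cons q Q ih => rw [List.foldl_cons, ih]; simp [openStep, PySem.List.length_pySetD]

lemma length_foldClose (N : Int) (Q : List (Int × Int × Int)) (L : List Int) :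
    (Q.foldl (closeStep N) L).length = L.length := by
  induction Q generalizing L with
  | nil => rfl
  | cons q Q ih =>
    rw [List.foldl_cons, ih]
    unfold closeStep
    split <;> simp [PySem.List.length_pySetD]

-- the two passes together deposit exactly A's difference-array entries
lemma eventsB_getD (N i : Int) (Q : List (Int × Int × Int))
    (hpre : ∀ q ∈ Q, PySem.Raise.InRange N.toNat (q.1 - 1) ∧
      (q.2.1 < N → PySem.Raise.InRange N.toNat q.2.1))
    (hi0 : 0 ≤ i) (hiN : i < N) :
    PySem.List.pyGetD (eventsB N Q) i 0 = PySem.List.pyGetD (solveList N Q) i 0 := by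
  unfold eventsB solveList
  rw [foldClose_getD N i Q _ (by rw [length_foldOpen]; simp)
        (fun q hq => (hpre q hq).2) hi0 hiN,
      foldOpen_getD N i Q _ (by simp) (fun q hq => (hpre q hq).1) hi0 hiN,
      foldA_getD N i Q _ (by simp) hpre hi0 hiN,
      getD_replicate _ _ hi0 (by omega), zero_add, zero_add]
  unfold contribQ
  rw [sum_map_sub]

-- Source B's accumulation loop computes the prefix sums
lemma accum_go (es : List Int) :
    ∀ (s : Int) (acc : List Int),
    es.foldl (fun (st : Int × List Int) e => (st.1 + e, st.2 ++ [st.1 + e])) (s, acc) =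
      (s + es.sum,
       acc ++ (List.range es.length).map (fun k => s + (es.take (k + 1)).sum)) := by
  induction es with
  | nil => intro s acc; simp
  | cons e es ih =>
    intro s acc
    rw [List.foldl_cons, ih]
    refine Prod.ext (by simp; ring) ?_
    simp only [List.length_cons, List.range_succ_eq_map, List.map_cons, List.map_map]
    simp [List.append_assoc, Function.comp]
    intro a _
    ring

lemma accumB_eq (es : List Int) :
    accumB es = (List.range es.length).map (fun k => (es.take (k + 1)).sum) := by
  unfold accumB; rw [accum_go]; simp

lemma length_accumB (es : List Int) : (accumB es).length = es.length := by
  rw [accumB_eq]; simp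

-- ===== VERDICT (by name: the statement is the Claim_ definition above) =====
theorem solve_spec : Claim_equal_solve := by
  intro N Q _ hPre
  unfold Spec_solve solve solve_alt totalsB
  rw [PySem.List.foldl_append_singleton_eq_map, PySem.List.slice_from_one]
  simp only [List.nil_append]
  congr 1
  have hlenE : (eventsB N Q).length = N.toNat := by
    unfold eventsB; rw [length_foldClose, length_foldOpen]; simp
  have hlenT : (accumB (eventsB N Q)).length = N.toNat := by
    rw [length_accumB, hlenE]
  apply List.ext_getElem
  · simp only [List.length_map, List.length_zip, List.length_tail,
      PySem.List.length_pyRange_one, hlenT]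
    omega
  · intro k hk1 hk2
    simp only [List.getElem_map, PySem.List.getElem_pyRange_one, List.getElem_zip,
      List.getElem_tail]
    have hkN : k + 1 < N.toNat := by
      simp only [List.length_map, List.length_zip, List.length_tail, hlenT] at hk2; omega
    have hD := eventsB_getD N (1 + k) Q hPre (by omega) (by omega)
    rw [PySem.List.pyGetD_eq_getElem _ 0 (by omega)
        (by rw [hlenE]; push_cast; omega)] at hD
    have hcast : ((1 : Int) + k).toNat = k + 1 := by omega
    simp only [hcast] at hD
    have hTk : (accumB (eventsB N Q))[k]'(by omega) =
        ((eventsB N Q).take (k + 1)).sum := by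
      simp [accumB_eq]
    have hTk1 : (accumB (eventsB N Q))[k + 1]'(by omega) =
        ((eventsB N Q).take (k + 1 + 1)).sum := by
      simp [accumB_eq]
    have hsum : ((eventsB N Q).take (k + 1 + 1)).sum =
        ((eventsB N Q).take (k + 1)).sum + (eventsB N Q)[k + 1]'(by omega) :=
      List.sum_take_succ _ _ _
    rw [hTk, hTk1, ← hD, hsum]
    split_ifs <;> first | rfl | omega
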